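-- pv_equiv track=rewrite | github.com/yzdx0000/StorTest2019 | test_cases/cases/test_case/P300/0-0-0-0/jira/P300_977.py | generate_wrongstr_para_lst
-- ===== SOURCE A (Python) =====
-- def generate_wrongstr_para_lst(org_para, wrong_sp):
--     """
--     Author：LiangXiaoyu
--     :param org_para(str):正确的参数
--     :param wrong_sp(str):非法字符
--     :return: wrongstr_para_lst(list):生成的错误参数（字符串组成的）列表,空格和#分别添加到每个值首字符，空格也添加到每个值尾字符
--     """
--     wrongstr_para_lst = []
--     b_split = org_para.split(",")
--     for i in range(len(b_split)):
--         b_org = b_split[i]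
--         for wrong_s in wrong_sp:
--             # 值首字符
--             b_split[i] = b_split[i].replace("=", "=" + wrong_s)
--             b_join = ",".join(b_split)
--             wrongstr_para_lst.append(b_join)
--             # 只替换一个值，故应还原
--             b_split[i] = b_org
--         # 尾字符
--         b_split[i] = b_split[i] + " "
--         b_join = ",".join(b_split)
--         wrongstr_para_lst.append(b_join)
--         # 只替换一个值，故应还原
--         b_split[i] = b_org
--     return wrongstr_para_lst
-- ===== SOURCE B (Python) =====
-- def generate_wrongstr_para_lst(org_para, wrong_sp):
--     segs = org_para.split(",")
--     n = len(segs)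
--     # suffix join after each index, computed once back-to-front
--     sufs = [""] * n
--     acc = ""
--     for i in range(n - 1, -1, -1):
--         sufs[i] = acc
--         acc = "," + segs[i] + acc
--     out = []
--     prefix = ""
--     for i, seg in enumerate(segs):
--         suf = sufs[i]
--         for c in wrong_sp:
--             out.append(prefix + seg.replace("=", "=" + c) + suf)
--         out.append(prefix + seg + " " + suf)
--         prefix += seg + ","
--     return out
-- ===== Notes on version B (the rewrite author's own statement) =====
-- stated objective: alternative
-- what changed: instead of mutating the split list and re-joining the whole list for every output string, B precomputes the joined suffix after each segment in one backward pass and maintains the joined prefix in the forward pass, building each output by concatenating prefix + modified segment + suffix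
import Mathlib
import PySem

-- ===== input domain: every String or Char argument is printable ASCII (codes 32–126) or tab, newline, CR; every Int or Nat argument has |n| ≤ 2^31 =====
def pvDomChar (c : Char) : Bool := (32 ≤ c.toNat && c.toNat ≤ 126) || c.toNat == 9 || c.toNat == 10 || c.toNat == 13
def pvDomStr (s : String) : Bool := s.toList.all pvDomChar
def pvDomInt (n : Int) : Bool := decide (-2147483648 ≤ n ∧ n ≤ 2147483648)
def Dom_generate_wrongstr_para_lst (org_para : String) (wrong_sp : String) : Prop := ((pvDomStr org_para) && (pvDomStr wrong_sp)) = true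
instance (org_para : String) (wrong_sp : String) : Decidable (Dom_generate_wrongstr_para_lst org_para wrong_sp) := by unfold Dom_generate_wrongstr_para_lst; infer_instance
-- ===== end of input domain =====

-- B replaces A's per-output list mutation + whole-list re-join by one backward pass of
-- precomputed suffix joins and a forward prefix accumulator (alternative algorithm, same cost).

-- ===== PORT A =====
def generate_wrongstr_para_lst (org_para : String) (wrong_sp : String) : List String :=
  let b_split := PySem.Chars.splitOn org_para.toList [',']
  (List.range b_split.length).foldl (fun wrongstr_para_lst i =>
    let b_org := b_split.getD i []
    -- inner loop over wrong_sp: replace "=" by "=" + wrong_s in segment i, join, append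
    let wrongstr_para_lst := wrong_sp.toList.foldl (fun acc wrong_s =>
      acc ++ [String.ofList (PySem.Chars.join [',']
        (b_split.set i (PySem.Chars.replace b_org ['='] ['=', wrong_s])))]) wrongstr_para_lst
    -- trailing-space variant, then the list is restored to b_org
    wrongstr_para_lst ++ [String.ofList (PySem.Chars.join [','] (b_split.set i (b_org ++ [' '])))]) []

-- ===== PORT B =====
-- backward pass of Source B: returns (suffix-join after each index, "," + join of the whole list)
def pvBuildSufs : List (List Char) → List (List Char) × List Char
  | [] => ([], [])
  | s :: rest =>
    let p := pvBuildSufs rest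
    (p.2 :: p.1, ',' :: (s ++ p.2))

-- forward pass of Source B: prefix accumulator, each output = prefix ++ modified segment ++ suffix
def pvBLoop (wrong : List Char) : List (List Char) → List (List Char) → List Char → List String
  | seg :: segs, suf :: sufs, pfx =>
      wrong.map (fun c => String.ofList (pfx ++ PySem.Chars.replace seg ['='] ['=', c] ++ suf))
        ++ [String.ofList (pfx ++ (seg ++ [' ']) ++ suf)]
        ++ pvBLoop wrong segs sufs (pfx ++ seg ++ [','])
  | _, _, _ => []

def generate_wrongstr_para_lst_alt (org_para : String) (wrong_sp : String) : List String :=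
  let segs := PySem.Chars.splitOn org_para.toList [',']
  pvBLoop wrong_sp.toList segs (pvBuildSufs segs).1 []

-- ===== PRECONDITION & SPEC =====
def Spec_generate_wrongstr_para_lst (org_para : String) (wrong_sp : String) (out : List String) : Prop := out = generate_wrongstr_para_lst_alt org_para wrong_sp
instance (org_para : String) (wrong_sp : String) (out : List String) : Decidable (Spec_generate_wrongstr_para_lst org_para wrong_sp out) := by unfold Spec_generate_wrongstr_para_lst; infer_instance

-- ===== CLAIM (what is proved, stated in full; the proofs are below) =====
def Claim_equal_generate_wrongstr_para_lst : Prop := ∀ (org_para : String) (wrong_sp : String), Dom_generate_wrongstr_para_lst org_para wrong_sp → Spec_generate_wrongstr_para_lst org_para wrong_sp (generate_wrongstr_para_lst org_para wrong_sp)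

-- ===== LEMMAS AND PROOFS =====
-- the suffix join after a (possibly empty) tail, and the flattened prefix (pre.map (· ++ ","))
def pvSufExpr (post : List (List Char)) : List Char :=
  if post = [] then [] else ',' :: PySem.Chars.join [','] post

def pvPfxExpr (pre : List (List Char)) : List Char := (pre.map (· ++ [','])).flatten

lemma pv_join_cons (l : List (List Char)) (p : List Char) (h : l ≠ []) :
    PySem.Chars.join [','] (p :: l) = p ++ [','] ++ PySem.Chars.join [','] l := by
  match l with
  | [] => exact absurd rfl h
  | q :: rest => exact PySem.Chars.join_cons_cons [','] p q rest

lemma pvBuildSufs_snd (l : List (List Char)) : (pvBuildSufs l).2 = pvSufExpr l := by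
  induction l with
  | nil => rfl
  | cons s rest ih =>
    simp only [pvBuildSufs, ih, pvSufExpr]
    cases rest with
    | nil => simp [PySem.Chars.join_singleton]
    | cons q rs => rw [pv_join_cons (q :: rs) s (by simp)]; simp

lemma pv_join_set (pre post : List (List Char)) (y : List Char) :
    PySem.Chars.join [','] (pre ++ y :: post) = pvPfxExpr pre ++ (y ++ pvSufExpr post) := by
  induction pre with
  | nil =>
    simp only [List.nil_append, pvPfxExpr, List.map_nil, List.flatten_nil, pvSufExpr]
    cases post with
    | nil => simp [PySem.Chars.join_singleton]
    | cons q rs => rw [pv_join_cons (q :: rs) y (by simp)]; simp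
  | cons p pre' ih =>
    rw [List.cons_append, pv_join_cons _ _ (by simp)]
    simp only [pvPfxExpr, List.map_cons, List.flatten_cons] at *
    simp [ih]

lemma pv_main (wrong : List Char) (full : List (List Char)) :
    ∀ (rest pre : List (List Char)), full = pre ++ rest →
    ((List.range' pre.length rest.length).flatMap (fun i =>
        (wrong.map (fun c => String.ofList (PySem.Chars.join [',']
          (full.set i (PySem.Chars.replace (full.getD i []) ['='] ['=', c])))))
        ++ [String.ofList (PySem.Chars.join [','] (full.set i ((full.getD i []) ++ [' '])))]))
    = pvBLoop wrong rest (pvBuildSufs rest).1 (pvPfxExpr pre) := by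
  intro rest
  induction rest with
  | nil => intro pre _; simp [pvBLoop]
  | cons seg rest' ih =>
    intro pre hfull
    have hget : full.getD pre.length [] = seg := by
      subst hfull
      simp [List.getD]
    have hset : ∀ y, full.set pre.length y = pre ++ y :: rest' := by
      intro y; subst hfull
      simp
    have hsufs : (pvBuildSufs (seg :: rest')).1 = pvSufExpr rest' :: (pvBuildSufs rest').1 := by
      simp [pvBuildSufs, pvBuildSufs_snd]
    rw [List.length_cons, List.range'_succ, List.flatMap_cons, hsufs]
    simp only [pvBLoop, hget, hset, pv_join_set]
    have hpfx : pvPfxExpr pre ++ seg ++ [','] = pvPfxExpr (pre ++ [seg]) := by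
      simp [pvPfxExpr]
    have hlen : pre.length + 1 = (pre ++ [seg]).length := by simp
    rw [hlen, hpfx, ih (pre ++ [seg]) (by simp [hfull])]
    simp

-- ===== VERDICT (by name: the statement is the Claim_ definition above) =====
theorem generate_wrongstr_para_lst_spec : Claim_equal_generate_wrongstr_para_lst := by
  intro org_para wrong_sp _
  unfold Spec_generate_wrongstr_para_lst generate_wrongstr_para_lst generate_wrongstr_para_lst_alt
  simp only [PySem.List.foldl_append_singleton_eq_map, List.append_assoc,
    PySem.List.foldl_append_eq_flatMap, List.nil_append]
  have := pv_main wrong_sp.toList (PySem.Chars.splitOn org_para.toList [','])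
    (PySem.Chars.splitOn org_para.toList [',']) [] rfl
  simpa [pvPfxExpr, List.range_eq_range'] using this
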